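-- pv_equiv track=rewrite | github.com/blueboy1593/algorithm | Programmers/월간코드챌린지시즌1_11월/prob4.py | solution
-- ===== SOURCE A (Python) =====
-- from collections import defaultdict
--
-- def solution(t):
--     answer = [0]
--     injub = defaultdict(list)
--     for a, b in t:
--         injub[a].append(b)
--         injub[b].append(a)
--
--     def backtracking(node, cnt):
--         if cnt > answer[0]:
--             answer[0] = cnt
--
--         node_injub = injub[node]
--         for no in node_injub:
--             if visited[no] == 0:
--                 visited[no] += 1
--                 backtracking(no, cnt + 1)
--                 visited[no] -= 1
--             elif visited[no] == 1:
--                 visited[no] += 1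
--                 backtracking(no, cnt)
--                 visited[no] -= 1
--
--     for key in injub.keys():
--         visited = defaultdict(int)
--         visited[key] += 1
--         backtracking(key, 1)
--     return answer[0]
-- ===== SOURCE B (Python) =====
-- def solution(t):
--     injub = {}
--     for a, b in t:
--         injub.setdefault(a, []).append(b)
--         injub.setdefault(b, []).append(a)
--
--     answer = 0
--     for key in injub:
--         visited = {key: 1}
--         if 1 > answer:
--             answer = 1
--         # explicit stack of frames: [node, cnt, remaining neighbours to try]
--         stack = [[key, 1, list(injub[key])]]
--         while stack:
--             node, cnt, rem = stack[-1]
--             if not rem: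
--                 stack.pop()
--                 visited[node] = visited.get(node, 0) - 1
--                 continue
--             no = rem.pop(0)
--             v = visited.get(no, 0)
--             if v == 0:
--                 visited[no] = 1
--                 if cnt + 1 > answer:
--                     answer = cnt + 1
--                 stack.append([no, cnt + 1, list(injub[no])])
--             elif v == 1:
--                 visited[no] = 2
--                 if cnt > answer:
--                     answer = cnt
--                 stack.append([no, cnt, list(injub[no])])
--     return answer
-- ===== Notes on version B (the rewrite author's own statement) =====
-- stated objective: alternative
-- what changed: The recursive backtracking closure mutating a shared answer cell is replaced by an iterative DFS over an explicit stack of (node, cnt, remaining-neighbours) frames with the visit counter decremented when a frame is popped, keeping the same twice-visit guards.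
import Mathlib
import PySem

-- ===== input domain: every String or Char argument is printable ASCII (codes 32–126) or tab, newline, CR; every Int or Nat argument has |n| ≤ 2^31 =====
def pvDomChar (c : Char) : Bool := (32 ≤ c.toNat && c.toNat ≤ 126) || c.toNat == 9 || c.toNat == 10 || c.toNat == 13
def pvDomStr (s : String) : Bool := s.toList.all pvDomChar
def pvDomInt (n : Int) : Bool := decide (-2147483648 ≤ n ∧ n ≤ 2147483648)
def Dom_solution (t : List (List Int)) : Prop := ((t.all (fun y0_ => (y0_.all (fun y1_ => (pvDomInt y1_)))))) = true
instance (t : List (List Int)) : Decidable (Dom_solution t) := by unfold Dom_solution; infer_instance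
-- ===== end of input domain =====

-- B replaces A's recursive backtracking closure (mutating a shared answer cell) by an
-- iterative DFS over an explicit stack of (node, cnt, remaining-neighbours) frames, with the
-- visit counter decremented when a frame is popped; same guards, same search, same cost.

-- ===== PORT A =====
-- injub: defaultdict(list) built from the edge list (for a, b in t: injub[a].append(b); injub[b].append(a))
def buildInjub (t : List (List Int)) : PySem.Dict Int (List Int) :=
  t.foldl (fun d row =>
    match row with
    | [a, b] =>
      let d := d.insert a (d.getD a [] ++ [b])
      d.insert b (d.getD b [] ++ [a])
    | _ => d) PySem.Dict.empty

-- backtracking(node, cnt): updates answer at entry, then recurses over injub[node] with the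
-- visited counter incremented around each call (modelled functionally: the recursive call gets
-- the incremented map, the continuation the original map — exactly the += 1 / -= 1 pair; only
-- values of `visited` are ever read, so the function model is exact).
-- fuel is a totality guard only: recursion depth is below 2*|keys|+1, so it never runs out.
mutual
def backtrackA (inj : Int → List Int) (fuel : Nat) (node cnt : Int) (vis : Int → Int) (ans : Int) : Int :=
  match fuel with
  | 0 => if cnt > ans then cnt else ans
  | Nat.succ f => loopA inj f (inj node) cnt vis (if cnt > ans then cnt else ans)
termination_by (fuel, 0)

def loopA (inj : Int → List Int) (f : Nat) (l : List Int) (cnt : Int) (vis : Int → Int) (ans : Int) : Int :=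
  match l with
  | [] => ans
  | no :: rest =>
    loopA inj f rest cnt vis
      (if vis no = 0 then backtrackA inj f no (cnt + 1) (fun x => if x = no then vis no + 1 else vis x) ans
       else if vis no = 1 then backtrackA inj f no cnt (fun x => if x = no then vis no + 1 else vis x) ans
       else ans)
termination_by (f, l.length + 1)
end

def solution (t : List (List Int)) : Int :=
  let injub := buildInjub t
  let fuel := 2 * injub.keys.length + 1
  injub.keys.foldl
    (fun ans key =>
      backtrackA (fun n => injub.getD n []) fuel key 1 (fun x => if x = key then 1 else 0) ans)
    0

-- ===== PORT B =====
def buildAdj (t : List (List Int)) : PySem.Dict Int (List Int) :=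
  t.foldl (fun d row =>
    match row with
    | [a, b] =>
      let d := d.insert a (d.getD a [] ++ [b])
      d.insert b (d.getD b [] ++ [a])
    | _ => d) PySem.Dict.empty

-- visited[no] = visited.get(no, 0) + 1 / visited[node] -= 1, as function updates
def incV (no : Int) (vis : Int → Int) : Int → Int := fun x => if x = no then vis no + 1 else vis x
def decV (no : Int) (vis : Int → Int) : Int → Int := fun x => if x = no then vis no - 1 else vis x

-- the neighbour list a pushed frame starts with; the depth budget f (2*|keys| at the seed,
-- one less per push — never reached by the search) is a totality guard shared with port A
def childB (adj : Int → List Int) (f : Nat) (no : Int) : List Int :=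
  match f with
  | 0 => []
  | Nat.succ _ => adj no

-- the while-stack loop of Source B; fuel counts machine steps (a totality guard, none = exhausted)
def runB (adj : Int → List Int) (fuel : Nat) (stack : List (Int × Int × List Int × Nat))
    (vis : Int → Int) (best : Int) : Option Int :=
  match fuel with
  | 0 => none
  | Nat.succ fuel =>
    match stack with
    | [] => some best
    | (node, cnt, l, f) :: rest =>
      match l with
      | [] => runB adj fuel rest (decV node vis) best
      | no :: l' =>
        if vis no = 0 then
          runB adj fuel ((no, cnt + 1, childB adj f no, f - 1) :: (node, cnt, l', f) :: rest)
            (incV no vis) (if cnt + 1 > best then cnt + 1 else best)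
        else if vis no = 1 then
          runB adj fuel ((no, cnt, childB adj f no, f - 1) :: (node, cnt, l', f) :: rest)
            (incV no vis) (if cnt > best then cnt else best)
        else
          runB adj fuel ((node, cnt, l', f) :: rest) vis best

def maxLenB (adj : PySem.Dict Int (List Int)) : Nat :=
  adj.values.foldl (fun m v => max m v.length) 0

-- a step-count bound for one frame's whole processing, used only to pick a sufficient fuel
def costC (L : Nat) : Nat → Nat
  | 0 => 1
  | f + 1 => L * (1 + costC L f) + 1

def solution_alt (t : List (List Int)) : Int :=
  let adj := buildAdj t
  let adjF := fun n => adj.getD n []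
  let K := adj.keys.length
  let fuel := costC (maxLenB adj) (2 * K + 1) + 1
  adj.keys.foldl
    (fun ans key =>
      let best0 := if 1 > ans then 1 else ans
      match runB adjF fuel [(key, 1, adjF key, 2 * K)] (fun x => if x = key then 1 else 0) best0 with
      | some v => v
      | none => best0)
    0

-- ===== PRECONDITION & SPEC =====
-- A raises ValueError unpacking `for a, b in t` on any row whose length is not 2; those inputs are excluded.
def Pre_solution (t : List (List Int)) : Prop := ∀ row ∈ t, row.length = 2
instance (t : List (List Int)) : Decidable (Pre_solution t) := by unfold Pre_solution; infer_instance
def pvWitness_solution : List (List Int) := [[1, 2], [2, 3], [3, 1]]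

def Spec_solution (t : List (List Int)) (out : Int) : Prop := out = solution_alt t
instance (t : List (List Int)) (out : Int) : Decidable (Spec_solution t out) := by unfold Spec_solution; infer_instance

-- ===== CLAIM (what is proved, stated in full; the proofs are below) =====
def Claim_equal_solution : Prop := ∀ (t : List (List Int)), Dom_solution t → Pre_solution t → Spec_solution t (solution t)

-- ===== LEMMAS AND PROOFS =====

lemma dec_inc (no : Int) (vis : Int → Int) : decV no (incV no vis) = vis := by
  funext x
  by_cases h : x = no <;> simp [decV, incV, h]

lemma runB_mono (adj : Int → List Int) :
    ∀ (fuel : Nat) (s : List (Int × Int × List Int × Nat)) (vis : Int → Int) (best r : Int),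
      runB adj fuel s vis best = some r → runB adj (fuel + 1) s vis best = some r := by
  intro fuel
  induction fuel with
  | zero => intro s vis best r h; simp [runB] at h
  | succ f ih =>
    intro s vis best r h
    match s with
    | [] => exact h
    | (node, cnt, l, fr) :: rest =>
      match l with
      | [] => exact ih _ _ _ _ h
      | no :: l' =>
        rw [runB] at h ⊢
        split_ifs at h ⊢ <;> exact ih _ _ _ _ h

lemma runB_mono_le (adj : Int → List Int) {fuel fuel' : Nat} (hle : fuel ≤ fuel')
    {s : List (Int × Int × List Int × Nat)} {vis : Int → Int} {best r : Int}
    (h : runB adj fuel s vis best = some r) : runB adj fuel' s vis best = some r := by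
  induction hle with
  | refl => exact h
  | step _ ih => exact runB_mono adj _ _ _ _ _ ih
  
lemma costC_pos (L : Nat) (f : Nat) : 1 ≤ costC L f := by
  cases f <;> simp [costC]

-- the machine simulates A's loop: processing one frame on top of `rest` ends exactly where
-- `rest` continues with the frame's node decremented and A's loop result as the running best
lemma simB (adj : Int → List Int) (L : Nat) (hL : ∀ x, (adj x).length ≤ L) :
    ∀ (f : Nat) (l : List Int) (node cnt : Int) (vis : Int → Int) (best : Int)
      (rest : List (Int × Int × List Int × Nat)) (fuel : Nat) (r : Int),
      runB adj fuel rest (decV node vis) (loopA adj f l cnt vis best) = some r →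
      runB adj (l.length * (1 + costC L f) + 1 + fuel) ((node, cnt, l, f) :: rest) vis best = some r := by
  intro f
  induction f with
  | zero =>
    intro l
    induction l with
    | nil =>
      intro node cnt vis best rest fuel r h
      rw [loopA] at h
      have e : ([] : List Int).length * (1 + costC L 0) + 1 + fuel = fuel + 1 := by simp; ring
      rw [e, runB]
      exact h
    | cons no l' ihl =>
      intro node cnt vis best rest fuel r h
      rw [loopA] at h
      have e : (no :: l').length * (1 + costC L 0) + 1 + fuel
          = (l'.length * (1 + costC L 0) + 1 + fuel + 1) + 1 := by
        simp [costC]; ring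
      rw [e, runB]
      by_cases h0 : vis no = 0
      · rw [if_pos h0]
        rw [if_pos h0] at h
        rw [backtrackA] at h
        rw [show childB adj 0 no = [] from rfl, runB, dec_inc]
        exact ihl node cnt vis _ rest fuel r h
      · rw [if_neg h0]
        by_cases h1 : vis no = 1
        · rw [if_pos h1]
          rw [if_neg h0, if_pos h1] at h
          rw [backtrackA] at h
          rw [show childB adj 0 no = [] from rfl, runB, dec_inc]
          exact ihl node cnt vis _ rest fuel r h
        · rw [if_neg h1]
          rw [if_neg h0, if_neg h1] at h
          have h2 := ihl node cnt vis best rest fuel r h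
          exact runB_mono_le adj (by omega) (runB_mono adj _ _ _ _ _ h2)
  | succ f' ihf =>
    intro l
    induction l with
    | nil =>
      intro node cnt vis best rest fuel r h
      rw [loopA] at h
      have e : ([] : List Int).length * (1 + costC L (f' + 1)) + 1 + fuel = fuel + 1 := by simp; ring
      rw [e, runB]
      exact h
    | cons no l' ihl =>
      intro node cnt vis best rest fuel r h
      rw [loopA] at h
      have hlen : (adj no).length * (1 + costC L f') ≤ L * (1 + costC L f') :=
        Nat.mul_le_mul_right _ (hL no)
      have ec : costC L (f' + 1) = L * (1 + costC L f') + 1 := rfl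
      have e : (no :: l').length * (1 + costC L (f' + 1)) + 1 + fuel
          = ((no :: l').length * (1 + costC L (f' + 1)) + fuel) + 1 := by ring
      rw [e, runB]
      by_cases h0 : vis no = 0
      · rw [if_pos h0]
        rw [if_pos h0] at h
        rw [backtrackA] at h
        have h2 := ihl node cnt vis _ rest fuel r h
        have h3 := ihf (adj no) no (cnt + 1) (incV no vis)
          (if cnt + 1 > best then cnt + 1 else best)
          ((node, cnt, l', f' + 1) :: rest)
          (l'.length * (1 + costC L (f' + 1)) + 1 + fuel) r
          (by rw [dec_inc]; exact h2)
        rw [show childB adj (f' + 1) no = adj no from rfl, show f' + 1 - 1 = f' from rfl]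
        refine runB_mono_le adj ?_ h3
        have e2 : (no :: l').length * (1 + costC L (f' + 1))
            = l'.length * (1 + costC L (f' + 1)) + (1 + costC L (f' + 1)) := by
          simp; ring
        omega
      · rw [if_neg h0]
        by_cases h1 : vis no = 1
        · rw [if_pos h1]
          rw [if_neg h0, if_pos h1] at h
          rw [backtrackA] at h
          have h2 := ihl node cnt vis _ rest fuel r h
          have h3 := ihf (adj no) no cnt (incV no vis)
            (if cnt > best then cnt else best)
            ((node, cnt, l', f' + 1) :: rest)
            (l'.length * (1 + costC L (f' + 1)) + 1 + fuel) r
            (by rw [dec_inc]; exact h2)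
          rw [show childB adj (f' + 1) no = adj no from rfl, show f' + 1 - 1 = f' from rfl]
          refine runB_mono_le adj ?_ h3
          have e2 : (no :: l').length * (1 + costC L (f' + 1))
              = l'.length * (1 + costC L (f' + 1)) + (1 + costC L (f' + 1)) := by
            simp; ring
          omega
        · rw [if_neg h1]
          rw [if_neg h0, if_neg h1] at h
          have h2 := ihl node cnt vis best rest fuel r h
          refine runB_mono_le adj ?_ h2
          have hc := costC_pos L (f' + 1)
          have e2 : (no :: l').length * (1 + costC L (f' + 1))
              = l'.length * (1 + costC L (f' + 1)) + (1 + costC L (f' + 1)) := by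
            simp; ring
          omega

-- one seeded frame runs to exactly A's backtracking value
lemma seedB (adj : Int → List Int) (L : Nat) (hL : ∀ x, (adj x).length ≤ L)
    (K : Nat) (key ans : Int) :
    runB adj (costC L (2 * K + 1) + 1) [(key, 1, adj key, 2 * K)]
      (fun x => if x = key then 1 else 0) (if 1 > ans then 1 else ans)
      = some (backtrackA adj (2 * K + 1) key 1 (fun x => if x = key then 1 else 0) ans) := by
  rw [backtrackA]
  have h0 : runB adj 1 [] (decV key (fun x => if x = key then 1 else 0))
      (loopA adj (2 * K) (adj key) 1 (fun x => if x = key then 1 else 0) (if 1 > ans then 1 else ans))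
      = some (loopA adj (2 * K) (adj key) 1 (fun x => if x = key then 1 else 0) (if 1 > ans then 1 else ans)) := rfl
  have h1 := simB adj L hL (2 * K) (adj key) key 1 (fun x => if x = key then 1 else 0)
    (if 1 > ans then 1 else ans) [] 1 _ h0
  refine runB_mono_le adj ?_ h1
  have hlen : (adj key).length * (1 + costC L (2 * K)) ≤ L * (1 + costC L (2 * K)) :=
    Nat.mul_le_mul_right _ (hL key)
  have ec : costC L (2 * K + 1) = L * (1 + costC L (2 * K)) + 1 := rfl
  omega

lemma le_foldl_maxlen : ∀ (l : List (List Int)) (m : Nat),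
    m ≤ l.foldl (fun m v => max m v.length) m := by
  intro l
  induction l with
  | nil => intro m; simp
  | cons a l ih =>
    intro m
    simp only [List.foldl]
    exact le_trans (Nat.le_max_left m a.length) (ih _)

lemma mem_le_foldl_maxlen : ∀ (l : List (List Int)) (x : List Int) (m : Nat), x ∈ l →
    x.length ≤ l.foldl (fun m v => max m v.length) m := by
  intro l
  induction l with
  | nil => intro x m hx; simp at hx
  | cons a l ih =>
    intro x m hx
    simp only [List.foldl]
    rcases List.mem_cons.mp hx with h | h
    · subst h
      exact le_trans (Nat.le_max_right m x.length) (le_foldl_maxlen l _)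
    · exact ih x _ h

lemma getD_len_le (d : PySem.Dict Int (List Int)) (n : Int) :
    (d.getD n []).length ≤ maxLenB d := by
  rcases h : d.get? n with _ | v
  · rw [PySem.Dict.getD_eq_get?_getD, h]
    simp [maxLenB]
  · rw [PySem.Dict.getD_eq_get?_getD, h]
    have hmem : (n, v) ∈ d.items := PySem.Dict.mem_items_of_get?_eq_some d h
    have hv : v ∈ d.values := by
      simp only [PySem.Dict.values]
      exact List.mem_map.mpr ⟨(n, v), hmem, rfl⟩
    exact mem_le_foldl_maxlen d.values v 0 hv

lemma fold_eq (adj : PySem.Dict Int (List Int)) (K : Nat) :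
    ∀ (ks : List Int) (a0 : Int),
      ks.foldl (fun ans key =>
        backtrackA (fun n => adj.getD n []) (2 * K + 1) key 1 (fun x => if x = key then 1 else 0) ans) a0
      = ks.foldl (fun ans key =>
          let best0 := if 1 > ans then 1 else ans
          match runB (fun n => adj.getD n []) (costC (maxLenB adj) (2 * K + 1) + 1)
              [(key, 1, adj.getD key [], 2 * K)] (fun x => if x = key then 1 else 0) best0 with
          | some v => v
          | none => best0) a0 := by
  intro ks
  induction ks with
  | nil => intro a0; rfl
  | cons k rest ih =>
    intro a0
    simp only [List.foldl]
    rw [seedB (fun n => adj.getD n []) (maxLenB adj) (fun x => getD_len_le adj x) K k a0]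
    exact ih _

-- ===== VERDICT (by name: the statement is the Claim_ definition above) =====
theorem solution_spec : Claim_equal_solution := by
  intro t _ _
  unfold Spec_solution solution solution_alt buildInjub buildAdj
  dsimp only
  exact fold_eq _ _ _ 0
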